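-- pv_equiv track=rewrite | github.com/evaldasJankus/_CODING | PROGRAMING/PYTHON/python_advent_to_code/2020/Day6/form_answers.py | get_intersect_list
-- ===== SOURCE A (Python) =====
-- def get_intersect_list(groups):
--     groups_index = []
--     for group in groups:
--         if len(group) == 1:
--             groups_index.append((group[0],len(group[0])))
--             continue
--         intersect = group[0].intersection(*group[1:])
--         groups_index.append((intersect, len(intersect)))
--     return groups_index
-- ===== SOURCE B (Python) =====
-- def get_intersect_list(groups):
--     def meet(group):
--         # Count how many of the group's sets each element belongs to;
--         # an element of the first set is common iff its count equals the group size.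
--         counts = {}
--         for s in group:
--             for x in s:
--                 counts[x] = counts.get(x, 0) + 1
--         need = len(group)
--         return {x for x in group[0] if counts[x] == need}
--     return [(inter, len(inter)) for inter in map(meet, groups)]
-- ===== Notes on version B (the rewrite author's own statement) =====
-- stated objective: alternative
-- what changed: Replaces A's per-group variadic set intersection (membership test of each element of group[0] in every other set) and its len==1 special case by an occurrence-counting algorithm: one counter over all elements of the group's sets, keeping an element of group[0] iff its count equals the number of sets.
import Mathlib
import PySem

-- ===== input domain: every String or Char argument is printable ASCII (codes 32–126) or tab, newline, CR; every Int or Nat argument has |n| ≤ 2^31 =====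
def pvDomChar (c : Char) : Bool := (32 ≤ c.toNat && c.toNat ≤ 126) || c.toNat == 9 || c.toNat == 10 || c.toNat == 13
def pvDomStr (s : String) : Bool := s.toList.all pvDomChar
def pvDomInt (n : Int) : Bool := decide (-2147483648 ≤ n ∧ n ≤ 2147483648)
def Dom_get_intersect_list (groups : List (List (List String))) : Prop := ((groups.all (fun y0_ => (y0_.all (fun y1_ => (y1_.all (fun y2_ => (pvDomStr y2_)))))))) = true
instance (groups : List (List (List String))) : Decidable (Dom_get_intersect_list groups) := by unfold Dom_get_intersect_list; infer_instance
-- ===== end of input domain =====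

-- B replaces A's variadic set intersection (membership in every other set) by occurrence counting:
-- one counter over all the group's elements, keeping an element of group[0] iff its count equals the group size.
-- Sets are represented as lists of their distinct elements; the intersection keeps group[0]'s element order.

-- ===== PORT A =====
-- group[0].intersection(*group[1:]): the elements of group[0] lying in every remaining set
def pvIntersectAll (g0 : List String) (rest : List (List String)) : List String :=
  g0.filter (fun x => rest.all (fun t => t.contains x))

-- one iteration of A's loop body (the len==1 branch, else the variadic intersection)
def pvStepA (acc : List (List String × Int)) (group : List (List String)) : List (List String × Int) :=
  match group with
  | [] => acc  -- Python raises IndexError here; excluded by Pre_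
  | g0 :: rest =>
    if rest.isEmpty then acc ++ [(g0, (g0.length : Int))]
    else
      let intersect := pvIntersectAll g0 rest
      acc ++ [(intersect, (intersect.length : Int))]

def get_intersect_list (groups : List (List (List String))) : List (List String × Int) :=
  groups.foldl pvStepA []

-- ===== PORT B =====
-- counts[x] = counts.get(x, 0) + 1 over all elements of all of the group's sets
def pvCounts (group : List (List String)) : PySem.Dict String Int :=
  group.foldl (fun d s => s.foldl (fun d x => d.insert x (d.getD x 0 + 1)) d) PySem.Dict.empty

-- meet: {x for x in group[0] if counts[x] == len(group)}
-- (counts[x] is a plain index in Python; x ∈ group[0] was counted, so the key is present and getD is exact)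
def pvMeet (group : List (List String)) : List String :=
  match group with
  | [] => []  -- Python raises IndexError here; excluded by Pre_
  | g0 :: _ =>
    let counts := pvCounts group
    let need : Int := group.length
    g0.filter (fun x => counts.getD x 0 == need)

def get_intersect_list_alt (groups : List (List (List String))) : List (List String × Int) :=
  (groups.map pvMeet).map (fun m => (m, (m.length : Int)))

-- ===== PRECONDITION & SPEC =====
-- Pre_ excludes inputs containing an empty group (A raises IndexError there, as does B), and requires
-- each inner list to be duplicate-free: that is the set-representation invariant of the type convention
-- (a Python set never holds duplicates), so it excludes no Python-reachable input.
def Pre_get_intersect_list (groups : List (List (List String))) : Prop :=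
  (∀ g ∈ groups, g ≠ []) ∧ (∀ g ∈ groups, ∀ s ∈ g, s.Nodup)

instance (groups : List (List (List String))) : Decidable (Pre_get_intersect_list groups) := by
  unfold Pre_get_intersect_list; infer_instance

def pvWitness_get_intersect_list : List (List (List String)) :=
  [[["a", "b"], ["b", "c"]], [["x"]]]

def Spec_get_intersect_list (groups : List (List (List String))) (out : List (List String × Int)) : Prop := out = get_intersect_list_alt groups
instance (groups : List (List (List String))) (out : List (List String × Int)) : Decidable (Spec_get_intersect_list groups out) := by unfold Spec_get_intersect_list; infer_instance

-- ===== CLAIM (what is proved, stated in full; the proofs are below) =====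
def Claim_equal_get_intersect_list : Prop := ∀ (groups : List (List (List String))), Dom_get_intersect_list groups → Pre_get_intersect_list groups → Spec_get_intersect_list groups (get_intersect_list groups)

-- ===== LEMMAS AND PROOFS =====

-- counter accumulated over a list of sets: getD is the running total of per-set counts
lemma counts_getD (group : List (List String)) (d : PySem.Dict String Int) (x : String) :
    (group.foldl (fun d s => s.foldl (fun d x => d.insert x (d.getD x 0 + 1)) d) d).getD x 0
      = d.getD x 0 + (group.map (fun s => (s.count x : Int))).sum := by
  induction group generalizing d with
  | nil => simp
  | cons s rest ih =>
    simp only [List.foldl_cons, ih, PySem.Dict.getD_foldl_insert_add_one, List.map_cons,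
      List.sum_cons]
    ring

-- for duplicate-free sets, the summed counts of x are the number of sets containing x
lemma sum_count_eq_countP (rest : List (List String)) (x : String)
    (h : ∀ s ∈ rest, s.Nodup) :
    (rest.map (fun s => (s.count x : Int))).sum
      = (rest.countP (fun t => t.contains x) : Int) := by
  induction rest with
  | nil => simp
  | cons t ts ih =>
    have ht : t.Nodup := h t (List.mem_cons_self)
    have hts := ih (fun s hs => h s (List.mem_cons_of_mem _ hs))
    simp only [List.map_cons, List.sum_cons, hts, List.countP_cons]
    by_cases hx : x ∈ t
    · have hc1 : t.count x = 1 := List.count_eq_one_of_mem ht hx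
      have hcx : t.contains x = true := by simpa using hx
      simp only [hc1, hcx, if_true]
      push_cast; ring
    · have hc0 : t.count x = 0 := List.count_eq_zero.mpr hx
      simp [hc0, hx]

-- B's counting filter equals A's "in every remaining set" filter on a duplicate-free group
lemma pvMeet_cons (g0 : List String) (rest : List (List String))
    (h0 : g0.Nodup) (h : ∀ s ∈ rest, s.Nodup) :
    pvMeet (g0 :: rest) = pvIntersectAll g0 rest := by
  unfold pvMeet pvIntersectAll pvCounts
  apply List.filter_congr
  intro x hx
  have hcount : ((g0 :: rest).foldl
      (fun d s => s.foldl (fun d x => d.insert x (d.getD x 0 + 1)) d) PySem.Dict.empty).getD x 0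
      = 1 + (rest.countP (fun t => t.contains x) : Int) := by
    rw [counts_getD]
    simp only [List.map_cons, List.sum_cons]
    rw [sum_count_eq_countP _ _ h]
    simp [List.count_eq_one_of_mem h0 hx]
  simp only [List.length_cons]
  rw [hcount]
  cases heq : rest.all (fun t => t.contains x) with
  | true =>
    have hall : ∀ t ∈ rest, t.contains x = true := List.all_eq_true.mp heq
    have hc : rest.countP (fun t => t.contains x) = rest.length :=
      List.countP_eq_length.mpr hall
    rw [hc]
    simp only [beq_iff_eq]
    push_cast; ring
  | false =>
    obtain ⟨t, htm, hxm⟩ : ∃ t ∈ rest, ¬ t.contains x = true := by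
      simpa [List.all_eq_false] using heq
    have hc : rest.countP (fun t => t.contains x) < rest.length :=
      List.countP_lt_length_iff.mpr ⟨t, htm, by simpa using hxm⟩
    exact beq_eq_false_iff_ne.mpr (by push_cast; omega)

-- A's fold with accumulator equals B's map, group by group, under Pre_
lemma fold_eq_map (gs : List (List (List String))) (acc : List (List String × Int))
    (hne : ∀ g ∈ gs, g ≠ []) (hnd : ∀ g ∈ gs, ∀ s ∈ g, s.Nodup) :
    gs.foldl pvStepA acc
      = acc ++ (gs.map pvMeet).map (fun m => (m, (m.length : Int))) := by
  induction gs generalizing acc with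
  | nil => simp
  | cons g gs ih =>
    have hg : g ≠ [] := hne g (List.mem_cons_self)
    obtain ⟨g0, rest, rfl⟩ : ∃ g0 rest, g = g0 :: rest := by
      cases g with
      | nil => exact absurd rfl hg
      | cons g0 rest => exact ⟨g0, rest, rfl⟩
    have hg_all : ∀ s ∈ g0 :: rest, s.Nodup := hnd (g0 :: rest) (List.mem_cons_self)
    have h0 : g0.Nodup := hg_all g0 (List.mem_cons_self)
    have hrest : ∀ s ∈ rest, s.Nodup :=
      fun s hs => hg_all s (List.mem_cons_of_mem _ hs)
    have hstep : pvStepA acc (g0 :: rest)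
        = acc ++ [(pvMeet (g0 :: rest), ((pvMeet (g0 :: rest)).length : Int))] := by
      rw [pvMeet_cons g0 rest h0 hrest]
      cases rest with
      | nil => simp [pvStepA, pvIntersectAll]
      | cons t ts => simp [pvStepA]
    rw [List.foldl_cons, hstep,
      ih _ (fun g' hg' => hne g' (List.mem_cons_of_mem _ hg'))
           (fun g' hg' => hnd g' (List.mem_cons_of_mem _ hg'))]
    simp

-- ===== VERDICT (by name: the statement is the Claim_ definition above) =====
theorem get_intersect_list_spec : Claim_equal_get_intersect_list := by
  intro groups _ hpre
  show get_intersect_list groups = get_intersect_list_alt groups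
  unfold get_intersect_list get_intersect_list_alt
  simpa using fold_eq_map groups [] hpre.1 hpre.2
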